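-- pv_equiv track=rewrite | github.com/kehindedamilare-dotcom/Text-Simplifier-and-Read-Aloud | src/ino/cleaner.py | normalize_paragraph_breaks
-- ===== SOURCE A (Python) =====
-- def normalize_paragraph_breaks(text):
--     """Reconstruct paragraphs from potentially broken or short lines."""
--     lines = text.splitlines()
--     result = []
--     current_paragraph = []
--
--     for line in lines:
--         stripped = line.strip()
--
--         # Empty line indicates paragraph break
--         if not stripped:
--             if current_paragraph:
--                 result.append(' '.join(current_paragraph))
--                 current_paragraph = []
--             result.append('')  # Preserve paragraph break
--         else:
--             # Add line to current paragraph
--             current_paragraph.append(stripped)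
--
--     # Don't forget last paragraph
--     if current_paragraph:
--         result.append(' '.join(current_paragraph))
--
--     return '\n'.join(result)
-- ===== SOURCE B (Python) =====
-- def normalize_paragraph_breaks(text):
--     """Reconstruct paragraphs from potentially broken or short lines."""
--     lines = text.splitlines()
--     result = []
--     i = 0
--     n = len(lines)
--     while i < n:
--         blank = not lines[i].strip()
--         j = i + 1
--         while j < n and (not lines[j].strip()) == blank:
--             j += 1
--         if blank:
--             result.extend([''] * (j - i))
--         else:
--             result.append(' '.join(line.strip() for line in lines[i:j]))
--         i = j
--     return '\n'.join(result)
-- ===== Notes on version B (the rewrite author's own statement) =====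
-- stated objective: alternative
-- what changed: B rebuilds paragraphs by scanning maximal runs of equally-blank lines (an inner while advancing over each run, emitting one joined paragraph per non-blank run and one '' per blank line) instead of A's single pass that threads a current_paragraph accumulator and flushes it on each blank line and at the end.
import Mathlib
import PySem

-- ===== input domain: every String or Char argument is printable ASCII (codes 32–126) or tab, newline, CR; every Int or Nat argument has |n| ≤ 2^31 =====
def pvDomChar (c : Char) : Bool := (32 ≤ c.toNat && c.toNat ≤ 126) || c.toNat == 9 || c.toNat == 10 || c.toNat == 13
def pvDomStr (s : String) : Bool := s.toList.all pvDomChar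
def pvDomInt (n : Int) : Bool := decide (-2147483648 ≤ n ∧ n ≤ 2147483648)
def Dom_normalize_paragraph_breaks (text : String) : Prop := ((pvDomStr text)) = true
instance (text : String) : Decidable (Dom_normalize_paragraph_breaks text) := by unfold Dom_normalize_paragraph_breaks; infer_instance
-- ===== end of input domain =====

-- B reconstructs paragraphs by scanning maximal runs of equally-blank lines instead of
-- threading a current-paragraph accumulator with flush-on-empty (objective: alternative).

-- ===== PORT A =====
-- the loop body: flush the current paragraph on a blank line, else accumulate the stripped line
def aStep (st : List String × List String) (line : String) : List String × List String :=
  let stripped := PySem.Str.strip line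
  if stripped == "" then
    let res := if st.2.isEmpty then st.1 else st.1 ++ [PySem.Str.join " " st.2]
    (res ++ [""], [])
  else
    (st.1, st.2 ++ [stripped])

def normalize_paragraph_breaks (text : String) : String :=
  let lines := PySem.Str.splitlines text
  let p := lines.foldl aStep ([], [])
  let res := if p.2.isEmpty then p.1 else p.1 ++ [PySem.Str.join " " p.2]
  PySem.Str.join "\n" res

-- ===== PORT B =====
-- run scanner: the head line fixes the blankness b of the run; the inner while loop
-- (advance j while blankness stays b) is takeWhile/dropWhile on the remaining lines
def bGroups : List String → List String
  | [] => []
  | l :: rest =>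
    let b := PySem.Str.strip l == ""
    let run := rest.takeWhile (fun x => (PySem.Str.strip x == "") == b)
    let rest' := rest.dropWhile (fun x => (PySem.Str.strip x == "") == b)
    if b then
      List.replicate (run.length + 1) "" ++ bGroups rest'
    else
      PySem.Str.join " " ((l :: run).map PySem.Str.strip) :: bGroups rest'
  termination_by ls => ls.length
  decreasing_by
    all_goals exact lt_of_le_of_lt (List.length_dropWhile_le _ _) (by simp)

def normalize_paragraph_breaks_alt (text : String) : String :=
  PySem.Str.join "\n" (bGroups (PySem.Str.splitlines text))

-- ===== PRECONDITION & SPEC =====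
def Spec_normalize_paragraph_breaks (text : String) (out : String) : Prop := out = normalize_paragraph_breaks_alt text
instance (text : String) (out : String) : Decidable (Spec_normalize_paragraph_breaks text out) := by unfold Spec_normalize_paragraph_breaks; infer_instance

-- ===== CLAIM (what is proved, stated in full; the proofs are below) =====
def Claim_equal_normalize_paragraph_breaks : Prop := ∀ (text : String), Dom_normalize_paragraph_breaks text → Spec_normalize_paragraph_breaks text (normalize_paragraph_breaks text)

-- ===== LEMMAS AND PROOFS =====

-- A's pending result: run the loop from accumulator cur, then apply the final flush
def aFin (cur : List String) (lines : List String) : List String :=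
  let p := lines.foldl aStep ([], cur)
  if p.2.isEmpty then p.1 else p.1 ++ [PySem.Str.join " " p.2]

def flushPar (xs : List String) : List String :=
  if xs.isEmpty then [] else [PySem.Str.join " " xs]

-- already-emitted output factors out of A's fold
theorem aStep_factor (lines : List String) (res cur : List String) :
    lines.foldl aStep (res, cur)
      = (res ++ (lines.foldl aStep ([], cur)).1, (lines.foldl aStep ([], cur)).2) := by
  induction lines generalizing res cur with
  | nil => simp
  | cons l rest ih =>
    simp only [List.foldl_cons]
    by_cases h : PySem.Str.strip l == ""
    · have hstep : ∀ r c, aStep (r, c) l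
          = ((if c.isEmpty then r else r ++ [PySem.Str.join " " c]) ++ [""], []) := by
        intro r c; simp [aStep, h]
      rw [hstep, hstep, ih, ih]
      by_cases hc : cur.isEmpty <;>
        simp [hc, ih [""] [], ih [PySem.Str.join " " cur, ""] [], List.append_assoc]
    · simp only [aStep, h, Bool.false_eq_true, if_false]
      exact ih res (cur ++ [PySem.Str.strip l])

theorem aFin_cons_blank (l : String) (rest : List String) (cur : List String)
    (h : PySem.Str.strip l = "") :
    aFin cur (l :: rest) = flushPar cur ++ [""] ++ aFin [] rest := by
  simp only [aFin, flushPar, List.foldl_cons, aStep, h]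
  by_cases hc : cur.isEmpty <;>
    · simp only [hc, beq_self_eq_true, if_true]
      rw [aStep_factor rest _ []]
      by_cases h2 : (rest.foldl aStep ([], [])).2.isEmpty <;> simp [h2]

theorem aFin_cons_nonblank (l : String) (rest : List String) (cur : List String)
    (h : ¬ PySem.Str.strip l = "") :
    aFin cur (l :: rest) = aFin (cur ++ [PySem.Str.strip l]) rest := by
  simp [aFin, aStep, h]

-- peeling one blank line off the front of bGroups
theorem bGroups_cons_blank (l : String) (rest : List String)
    (h : PySem.Str.strip l = "") :
    bGroups (l :: rest) = "" :: bGroups rest := by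
  match rest with
  | [] => simp [bGroups, h]
  | r :: t =>
    by_cases hr : PySem.Str.strip r == ""
    · rw [bGroups, bGroups]
      simp [h, hr, List.replicate_succ]
    · rw [bGroups]
      simp [h, hr]

-- unfolding bGroups at a nonblank head, in takeWhile/dropWhile form
theorem bGroups_cons_nonblank (l : String) (rest : List String)
    (h : ¬ PySem.Str.strip l = "") :
    bGroups (l :: rest)
      = PySem.Str.join " "
          ((l :: rest.takeWhile (fun x => !(PySem.Str.strip x == ""))).map PySem.Str.strip)
        :: bGroups (rest.dropWhile (fun x => !(PySem.Str.strip x == ""))) := by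
  have hb : (PySem.Str.strip l == "") = false := by simp [h]
  rw [bGroups]
  simp only [hb, beq_false, Bool.false_eq_true, if_false]

-- B's groups split at the first blank line
theorem bGroups_expand (lines : List String) :
    flushPar ((lines.takeWhile (fun x => !(PySem.Str.strip x == ""))).map PySem.Str.strip)
      ++ bGroups (lines.dropWhile (fun x => !(PySem.Str.strip x == ""))) = bGroups lines := by
  match lines with
  | [] => simp [flushPar, bGroups]
  | l :: rest =>
    by_cases h : PySem.Str.strip l = ""
    · simp [flushPar, h]
    · rw [bGroups_cons_nonblank l rest h]
      have hb : (PySem.Str.strip l == "") = false := by simp [h]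
      simp [flushPar, hb]

theorem aFin_eq (lines : List String) : ∀ cur : List String,
    aFin cur lines
      = flushPar (cur ++ (lines.takeWhile (fun x => !(PySem.Str.strip x == ""))).map PySem.Str.strip)
        ++ bGroups (lines.dropWhile (fun x => !(PySem.Str.strip x == ""))) := by
  induction lines with
  | nil => intro cur; simp [aFin, flushPar, bGroups]
  | cons l rest ih =>
    intro cur
    by_cases h : PySem.Str.strip l = ""
    · rw [aFin_cons_blank l rest cur h, ih []]
      simp only [List.nil_append]
      rw [bGroups_expand rest]
      simp [h, bGroups_cons_blank l rest h, List.append_assoc]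
    · rw [aFin_cons_nonblank l rest cur h, ih (cur ++ [PySem.Str.strip l])]
      have hb : (PySem.Str.strip l == "") = false := by simp [h]
      simp [hb, List.append_assoc]

theorem aFin_nil_eq_bGroups (lines : List String) : aFin [] lines = bGroups lines := by
  rw [aFin_eq lines []]
  simpa using bGroups_expand lines

-- ===== VERDICT (by name: the statement is the Claim_ definition above) =====
theorem normalize_paragraph_breaks_spec : Claim_equal_normalize_paragraph_breaks := by
  intro text _
  show normalize_paragraph_breaks text = normalize_paragraph_breaks_alt text
  unfold normalize_paragraph_breaks normalize_paragraph_breaks_alt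
  rw [← aFin_nil_eq_bGroups]
  rfl
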